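-- pv_equiv track=rewrite | github.com/vladholos492-wq/TRT-main | check_buttons_improved.py | check_handler_coverage
-- ===== SOURCE A (Python) =====
-- def check_handler_coverage(callbacks, handlers, startswith_handlers):
--     """Проверяет покрытие всех callback_data обработчиками"""
--     unhandled = []
--     handled = []
--
--     for cb in callbacks:
--         is_handled = False
--
--         # Проверяем точное совпадение
--         if cb in handlers:
--             is_handled = True
--             handled.append(cb)
--             continue
--
--         # Проверяем startswith
--         for sh in startswith_handlers:
--             if cb.startswith(sh):
--                 is_handled = True
--                 handled.append(f"{cb} (startswith: {sh})")
--                 break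
--
--         if not is_handled:
--             unhandled.append(cb)
--
--     return handled, unhandled
-- ===== SOURCE B (Python) =====
-- def check_handler_coverage(callbacks, handlers, startswith_handlers):
--     """Проверяет покрытие всех callback_data обработчиками"""
--     exact = set(handlers)
--     # first-occurrence index of each distinct prefix handler
--     first_idx = {}
--     for i, sh in enumerate(startswith_handlers):
--         if sh not in first_idx:
--             first_idx[sh] = i
--     handled = []
--     unhandled = []
--     for cb in callbacks:
--         if cb in exact:
--             handled.append(cb)
--             continue
--         # walk the callback's own prefixes instead of scanning the handler list
--         best = None  # (list index, matching prefix handler)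
--         for j in range(len(cb) + 1):
--             p = cb[:j]
--             i = first_idx.get(p)
--             if i is not None and (best is None or i < best[0]):
--                 best = (i, p)
--         if best is None:
--             unhandled.append(cb)
--         else:
--             handled.append(f"{cb} (startswith: {best[1]})")
--     return handled, unhandled
-- ===== Notes on version B (the rewrite author's own statement) =====
-- stated objective: faster
-- what changed: Replaces the inner scan over all startswith handlers per callback by a precomputed first-occurrence-index dictionary queried at each of the callback's own prefixes (plus a set for exact matches), picking the prefix handler with the smallest list index.
import Mathlib
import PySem

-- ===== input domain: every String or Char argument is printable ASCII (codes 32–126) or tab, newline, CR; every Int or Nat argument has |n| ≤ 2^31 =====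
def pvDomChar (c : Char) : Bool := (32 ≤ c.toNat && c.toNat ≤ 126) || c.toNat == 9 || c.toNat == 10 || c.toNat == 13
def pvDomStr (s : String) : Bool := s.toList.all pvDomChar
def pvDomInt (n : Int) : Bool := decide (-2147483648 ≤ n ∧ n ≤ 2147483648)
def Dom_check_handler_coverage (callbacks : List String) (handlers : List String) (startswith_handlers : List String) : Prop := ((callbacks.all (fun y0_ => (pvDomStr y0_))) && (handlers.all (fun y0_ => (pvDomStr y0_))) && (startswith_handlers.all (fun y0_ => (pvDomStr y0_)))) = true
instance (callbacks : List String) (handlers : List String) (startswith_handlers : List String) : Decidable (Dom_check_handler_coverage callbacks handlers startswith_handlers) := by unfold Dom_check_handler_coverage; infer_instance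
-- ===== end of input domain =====

-- B replaces A's inner scan of all startswith handlers (O(S·L) per callback) by a first-index
-- dictionary looked up at each of the callback's own prefixes (O(L²) per callback, S-independent).

-- ===== PORT A =====
-- f"{cb} (startswith: {sh})" (the same f-string appears in both Pythons)
def pvLabel (cb sh : String) : String :=
  String.ofList (cb.toList ++ " (startswith: ".toList ++ sh.toList ++ [')'])

-- 'for sh in startswith_handlers: if cb.startswith(sh): …; break' → first matching sh
def pvFirstSW (cb : String) : List String → Option String
  | [] => none
  | sh :: rest => if PySem.Str.startswith cb sh then some sh else pvFirstSW cb rest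

def check_handler_coverage (callbacks : List String) (handlers : List String) (startswith_handlers : List String) : List String × List String :=
  callbacks.foldl (fun st cb =>
    if handlers.contains cb then (st.1 ++ [cb], st.2)
    else
      match pvFirstSW cb startswith_handlers with
      | some sh => (st.1 ++ [pvLabel cb sh], st.2)
      | none => (st.1, st.2 ++ [cb])) ([], [])

-- ===== PORT B =====
-- first_idx: first-occurrence index of each distinct prefix handler
def pvFirstIdx (shs : List String) : PySem.Dict String Int :=
  (PySem.List.enumerate shs 0).foldl
    (fun d p => if d.contains p.2 then d else d.insert p.2 p.1) PySem.Dict.empty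

-- 'for j in range(len(cb)+1): p = cb[:j]; i = first_idx.get(p); …' keeping (index, prefix) min by index
def pvBest (cb : String) (d : PySem.Dict String Int) : Option (Int × String) :=
  (PySem.List.pyRange 0 (PySem.Str.len cb + 1) 1).foldl
    (fun best j =>
      let p := PySem.Str.slice cb none (some j)
      match d.get? p with
      | none => best
      | some i =>
        match best with
        | none => some (i, p)
        | some b => if i < b.1 then some (i, p) else best) none

def check_handler_coverage_alt (callbacks : List String) (handlers : List String) (startswith_handlers : List String) : List String × List String :=
  let exact := PySem.Set.ofList handlers
  let fi := pvFirstIdx startswith_handlers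
  callbacks.foldl (fun st cb =>
    if PySem.Set.contains exact cb then (st.1 ++ [cb], st.2)
    else
      match pvBest cb fi with
      | some b => (st.1 ++ [pvLabel cb b.2], st.2)
      | none => (st.1, st.2 ++ [cb])) ([], [])

-- ===== PRECONDITION & SPEC =====
def Spec_check_handler_coverage (callbacks : List String) (handlers : List String) (startswith_handlers : List String) (out : List String × List String) : Prop := out = check_handler_coverage_alt callbacks handlers startswith_handlers
instance (callbacks : List String) (handlers : List String) (startswith_handlers : List String) (out : List String × List String) : Decidable (Spec_check_handler_coverage callbacks handlers startswith_handlers out) := by unfold Spec_check_handler_coverage; infer_instance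

-- ===== CLAIM (what is proved, stated in full; the proofs are below) =====
def Claim_equal_check_handler_coverage : Prop := ∀ (callbacks : List String) (handlers : List String) (startswith_handlers : List String), Dom_check_handler_coverage callbacks handlers startswith_handlers → Spec_check_handler_coverage callbacks handlers startswith_handlers (check_handler_coverage callbacks handlers startswith_handlers)

-- ===== LEMMAS AND PROOFS =====

-- cb[:j] for a Nat j
def pvPref (cb : String) (j : Nat) : String := PySem.Str.slice cb none (some (j : Int))

theorem pvPref_toList (cb : String) (j : Nat) : (pvPref cb j).toList = cb.toList.take j := by
  simp [pvPref, PySem.Str.toList_slice, PySem.List.slice_to_natCast]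

-- startswith as a list prefix
theorem pvSW_iff (cb s : String) : PySem.Str.startswith cb s = true ↔ s.toList <+: cb.toList := by
  rw [PySem.Str.startswith_eq]; exact PySem.Chars.startswith_iff _ _

-- the dictionary stores the FIRST index of each string of shs
theorem pvFirstIdx_aux (shs : List String) : ∀ (k : Int) (d : PySem.Dict String Int) (s : String),
    ((PySem.List.enumerate shs k).foldl
      (fun d p => if d.contains p.2 then d else d.insert p.2 p.1) d).get? s
    = ((d.get? s).orElse (fun _ => (PySem.List.index? shs s).map (fun n => (n : Int) + k))) := by
  induction shs with
  | nil =>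
    intro k d s
    cases h : d.get? s <;> simp [PySem.List.enumerate, Option.orElse, h, PySem.List.index?]
  | cons x rest ih =>
    intro k d s
    rw [PySem.List.enumerate_cons, List.foldl_cons,
      ih (k + 1) (if d.contains x then d else d.insert x k) s]
    by_cases hx : x = s
    · subst hx
      rw [PySem.List.index?_cons_self]
      by_cases hc : d.contains x = true
      · rw [if_pos hc]
        rw [PySem.Dict.contains_eq_isSome_get?] at hc
        obtain ⟨v, hv⟩ := Option.isSome_iff_exists.mp hc
        simp [Option.orElse, hv]
      · rw [if_neg hc]
        rw [PySem.Dict.contains_eq_isSome_get?] at hc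
        have hnone : d.get? x = none := by
          cases h : d.get? x
          · rfl
          · rw [h] at hc; simp at hc
        rw [PySem.Dict.get?_insert_self]
        simp [Option.orElse, hnone]
    · rw [PySem.List.index?_cons_of_ne _ hx]
      have hget : (if d.contains x then d else d.insert x k).get? s = d.get? s := by
        by_cases hc : d.contains x = true
        · rw [if_pos hc]
        · rw [if_neg hc, PySem.Dict.get?_insert_of_ne _ _ (fun h => hx h.symm)]
      rw [hget]
      cases hg : d.get? s
      · cases hi : PySem.List.index? rest s <;>
          · simp [Option.orElse, hg, hi]
            try push_cast
            try ring
      · simp [Option.orElse, hg]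

theorem pvFirstIdx_get? (shs : List String) (s : String) :
    (pvFirstIdx shs).get? s = (PySem.List.index? shs s).map (fun n => (n : Int)) := by
  rw [pvFirstIdx, pvFirstIdx_aux shs 0 PySem.Dict.empty s]
  cases h : PySem.List.index? shs s <;>
    simp [PySem.Dict.get?_empty, Option.orElse, h]

-- abstract min-by-index fold
def pvMStep (f : Nat → Option Int) (pr : Nat → String)
    (best : Option (Int × String)) (j : Nat) : Option (Int × String) :=
  match f j with
  | none => best
  | some i =>
    match best with
    | none => some (i, pr j)
    | some b => if i < b.1 then some (i, pr j) else best

theorem pvMFold_none (f : Nat → Option Int) (pr : Nat → String) :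
    ∀ (js : List Nat) (acc : Option (Int × String)), (∀ j ∈ js, f j = none) →
      js.foldl (pvMStep f pr) acc = acc := by
  intro js
  induction js with
  | nil => intro acc _; rfl
  | cons j t ih =>
    intro acc h
    have hj : f j = none := h j (by simp)
    simp only [List.foldl_cons, pvMStep, hj]
    exact ih acc (fun j' hj' => h j' (by simp [hj']))

theorem pvMFold_origin (f : Nat → Option Int) (pr : Nat → String) :
    ∀ (js : List Nat) (acc : Option (Int × String)) (i : Int) (p : String),
      js.foldl (pvMStep f pr) acc = some (i, p) →
      acc = some (i, p) ∨ ∃ j ∈ js, f j = some i ∧ p = pr j := by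
  intro js
  induction js with
  | nil => intro acc i p h; exact Or.inl h
  | cons j t ih =>
    intro acc i p h
    rw [List.foldl_cons] at h
    rcases ih _ i p h with hacc | ⟨j', hj', hfj', hp⟩
    · unfold pvMStep at hacc
      cases hfj : f j with
      | none => rw [hfj] at hacc; exact Or.inl hacc
      | some i0 =>
        rw [hfj] at hacc
        cases acc with
        | none =>
          simp only [] at hacc
          cases hacc
          exact Or.inr ⟨j, by simp, hfj, rfl⟩
        | some b =>
          by_cases hlt : i0 < b.1
          · simp only [if_pos hlt] at hacc
            cases hacc
            exact Or.inr ⟨j, by simp, hfj, rfl⟩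
          · simp only [if_neg hlt] at hacc
            exact Or.inl hacc
    · exact Or.inr ⟨j', by simp [hj'], hfj', hp⟩

theorem pvMFold_mono (f : Nat → Option Int) (pr : Nat → String) :
    ∀ (js : List Nat) (i : Int) (p : String),
      ∃ i' p', js.foldl (pvMStep f pr) (some (i, p)) = some (i', p') ∧ i' ≤ i := by
  intro js
  induction js with
  | nil => intro i p; exact ⟨i, p, rfl, le_refl i⟩
  | cons j t ih =>
    intro i p
    rw [List.foldl_cons]
    unfold pvMStep
    cases hfj : f j with
    | none => exact ih i p
    | some i0 =>
      by_cases hlt : i0 < i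
      · simp only [if_pos hlt]
        obtain ⟨i', p', h, hle⟩ := ih i0 (pr j)
        exact ⟨i', p', h, le_trans hle (le_of_lt hlt)⟩
      · simp only [if_neg hlt]
        exact ih i p

theorem pvMFold_le (f : Nat → Option Int) (pr : Nat → String) :
    ∀ (js : List Nat) (acc : Option (Int × String)) (j0 : Nat) (i0 : Int),
      j0 ∈ js → f j0 = some i0 →
      ∃ i p, js.foldl (pvMStep f pr) acc = some (i, p) ∧ i ≤ i0 := by
  intro js
  induction js with
  | nil => intro acc j0 i0 h; cases h
  | cons j t ih =>
    intro acc j0 i0 hmem hf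
    rw [List.foldl_cons]
    rcases List.mem_cons.mp hmem with heq | htail
    · subst heq
      unfold pvMStep
      rw [hf]
      cases acc with
      | none =>
        obtain ⟨i', p', h, hle⟩ := pvMFold_mono f pr t i0 (pr j0)
        exact ⟨i', p', h, hle⟩
      | some b =>
        by_cases hlt : i0 < b.1
        · simp only [if_pos hlt]
          obtain ⟨i', p', h, hle⟩ := pvMFold_mono f pr t i0 (pr j0)
          exact ⟨i', p', h, hle⟩
        · simp only [if_neg hlt]
          obtain ⟨i', p', h, hle⟩ := pvMFold_mono f pr t b.1 b.2
          refine ⟨i', p', ?_, le_trans hle (not_lt.mp hlt)⟩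
          rw [← h]
          congr
    · exact ih _ j0 i0 htail hf

-- pvBest is that abstract fold
theorem pvBest_eq_mfold (cb : String) (d : PySem.Dict String Int) :
    pvBest cb d = (List.range (cb.toList.length + 1)).foldl
      (pvMStep (fun j => d.get? (pvPref cb j)) (pvPref cb)) none := by
  unfold pvBest
  have h1 : PySem.Str.len cb + 1 = ((cb.toList.length + 1 : Nat) : Int) := by
    simp [PySem.Str.len]
  rw [h1, PySem.List.pyRange_zero, Int.toNat_natCast, List.foldl_map]
  rfl

-- A's inner loop is find?
theorem pvFirstSW_eq_find? (cb : String) (shs : List String) :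
    pvFirstSW cb shs = shs.find? (fun sh => PySem.Str.startswith cb sh) := by
  induction shs with
  | nil => rfl
  | cons sh rest ih =>
    by_cases h : PySem.Str.startswith cb sh = true <;>
      rw [PySem.Str.startswith_eq] at h <;>
      simp [pvFirstSW, List.find?, PySem.Str.startswith_eq, h, ih]

-- KEY LEMMA: the min-index-over-prefixes search returns exactly A's first matching handler
theorem pvBest_eq (cb : String) (shs : List String) :
    (pvBest cb (pvFirstIdx shs)).map (fun b => b.2) = pvFirstSW cb shs := by
  rw [pvBest_eq_mfold, pvFirstSW_eq_find?]
  cases hfind : shs.find? (fun sh => PySem.Str.startswith cb sh) with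
  | none =>
    have hall := List.find?_eq_none.mp hfind
    have hnone : ∀ j ∈ List.range (cb.toList.length + 1),
        (fun j => (pvFirstIdx shs).get? (pvPref cb j)) j = none := by
      intro j _
      show (pvFirstIdx shs).get? (pvPref cb j) = none
      rw [pvFirstIdx_get?]
      cases hi : PySem.List.index? shs (pvPref cb j) with
      | none => rfl
      | some i =>
        obtain ⟨hlt, hget, -⟩ := PySem.List.getElem_of_index?_eq_some hi
        exfalso
        have hmem : pvPref cb j ∈ shs := hget ▸ List.getElem_mem hlt
        have hsw : PySem.Str.startswith cb (pvPref cb j) = true := by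
          rw [pvSW_iff, pvPref_toList]; exact List.take_prefix j _
        exact absurd hsw (by simpa using hall _ hmem)
    rw [pvMFold_none _ _ _ _ hnone]
    rfl
  | some sh0 =>
    obtain ⟨hP, as, bs, hdec, has⟩ := List.find?_eq_some_iff_append.mp hfind
    have hpre : sh0.toList <+: cb.toList := (pvSW_iff cb sh0).mp hP
    have hjle : sh0.toList.length ≤ cb.toList.length := hpre.length_le
    have hprefeq : pvPref cb sh0.toList.length = sh0 := by
      apply String.ext
      rw [pvPref_toList]
      exact (List.prefix_iff_eq_take.mp hpre).symm
    have hm0lt : as.length < shs.length := by rw [hdec]; simp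
    have hm0get : shs[as.length]'hm0lt = sh0 := by
      subst hdec; simp
    have hlb : ∀ (p : String) (i' : Nat), PySem.List.index? shs p = some i' →
        PySem.Str.startswith cb p = true → as.length ≤ i' := by
      intro p i' hidx hsw
      by_contra hc
      push_neg at hc
      obtain ⟨hlt, hget, -⟩ := PySem.List.getElem_of_index?_eq_some hidx
      have h1 : shs[i']'hlt = as[i']'(by omega) := by
        subst hdec; exact List.getElem_append_left (by omega)
      have h2 := has (as[i']'(by omega)) (List.getElem_mem _)
      rw [← h1, hget] at h2
      rw [PySem.Str.startswith_eq] at hsw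
      simp [hsw] at h2
    have hmem0 : sh0 ∈ shs := by subst hdec; simp
    obtain ⟨ic, hic⟩ := Option.isSome_iff_exists.mp
      ((PySem.List.index?_isSome_iff shs sh0).mpr hmem0)
    obtain ⟨hiclt, hicget, hicmin⟩ := PySem.List.getElem_of_index?_eq_some hic
    have hub : ic ≤ as.length := by
      by_contra hcc
      push_neg at hcc
      exact hicmin as.length hcc hm0get
    have hic_eq : ic = as.length := le_antisymm hub (hlb sh0 ic (hprefeq ▸ hic) hP)
    have hfj : (pvFirstIdx shs).get? (pvPref cb sh0.toList.length) = some (as.length : Int) := by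
      rw [hprefeq, pvFirstIdx_get?, hic, hic_eq]
      rfl
    have hjmem : sh0.toList.length ∈ List.range (cb.toList.length + 1) :=
      List.mem_range.mpr (by omega)
    obtain ⟨i, p, hfold, hile⟩ := pvMFold_le
      (fun j => (pvFirstIdx shs).get? (pvPref cb j)) (pvPref cb) _ none _ _ hjmem hfj
    rcases pvMFold_origin _ _ _ none i p hfold with hacc | ⟨j, hjm, hfj', hpp⟩
    · cases hacc
    · simp only [pvFirstIdx_get?] at hfj'
      cases hidx'' : PySem.List.index? shs (pvPref cb j) with
      | none => rw [hidx''] at hfj'; cases hfj'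
      | some i'' =>
        rw [hidx''] at hfj'
        simp at hfj'
        have hswp : PySem.Str.startswith cb (pvPref cb j) = true := by
          rw [pvSW_iff, pvPref_toList]; exact List.take_prefix _ _
        have hge : as.length ≤ i'' := hlb _ _ hidx'' hswp
        have hle' : (i'' : Int) ≤ (as.length : Int) := hfj' ▸ hile
        have hii : i'' = as.length := by
          have := Int.ofNat_le.mp (by exact_mod_cast hle')
          omega
        obtain ⟨hlt2, hget2, -⟩ := PySem.List.getElem_of_index?_eq_some hidx''
        subst hii
        have hpeq : pvPref cb j = sh0 := hget2.symm.trans hm0get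
        rw [hfold]
        simp [hpp, hpeq]

-- membership through set(handlers)
theorem pvSet_contains (hs : List String) (cb : String) :
    PySem.Set.contains (PySem.Set.ofList hs) cb = hs.contains cb := by
  rw [Bool.eq_iff_iff]
  simp only [PySem.Set.contains, List.contains_iff_mem]
  exact PySem.Set.mem_ofList hs cb

-- ===== VERDICT (by name: the statement is the Claim_ definition above) =====
theorem check_handler_coverage_spec : Claim_equal_check_handler_coverage := by
  intro callbacks handlers startswith_handlers _
  unfold Spec_check_handler_coverage check_handler_coverage check_handler_coverage_alt
  apply Eq.symm
  apply PySem.List.foldl_congr_mem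
  intro acc cb _
  rw [pvSet_contains]
  have h := pvBest_eq cb startswith_handlers
  cases hb : pvBest cb (pvFirstIdx startswith_handlers) with
  | none =>
    rw [hb] at h
    simp only [Option.map_none] at h
    rw [← h]
  | some b =>
    rw [hb] at h
    simp only [Option.map_some] at h
    rw [← h]
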